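-- pv_equiv track=rewrite | github.com/FelixP91/C_terminal_domain_analyzer | C_term_1.py | get_kingdom
-- ===== SOURCE A (Python) =====
-- def get_kingdom(lineage):
--     '''Returns either Archaea, Bacteria, Plant, Fungi, or Metazoa as kingdom'''
--     try:
--         superkingdom = [i for i in lineage.split(',') if '(superkingdom)' in i]
--         superkingdom_clean = superkingdom[0].replace('(superkingdom)', '').replace(' ', '')
--         if 'Bacteria' in superkingdom_clean or 'Archaea' in superkingdom_clean:
--             return superkingdom_clean
--         else:
--             kingdom = [i for i in lineage.split(',') if '(kingdom)' in i]
--             kingdom_clean = kingdom[0].replace('(kingdom)', '').replace(' ', '')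
--             return kingdom_clean
--     except IndexError:
--         return 'not_available'
-- ===== SOURCE B (Python) =====
-- def _field(lineage, tag):
--     """Locate tag's first occurrence in the raw string and cut out the
--     enclosing comma-delimited field; None if the tag does not occur."""
--     i = lineage.find(tag)
--     if i == -1:
--         return None
--     start = lineage.rfind(',', 0, i) + 1
--     end = lineage.find(',', i)
--     if end == -1:
--         end = len(lineage)
--     return lineage[start:end].replace(tag, '').replace(' ', '')
--
--
-- def get_kingdom(lineage):
--     '''Returns either Archaea, Bacteria, Plant, Fungi, or Metazoa as kingdom'''
--     sk = _field(lineage, '(superkingdom)')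
--     if sk is None:
--         return 'not_available'
--     if 'Bacteria' in sk or 'Archaea' in sk:
--         return sk
--     kd = _field(lineage, '(kingdom)')
--     return 'not_available' if kd is None else kd
-- ===== Notes on version B (the rewrite author's own statement) =====
-- stated objective: alternative
-- what changed: B never splits the lineage: it searches the raw string for the tag's first occurrence with str.find and cuts out the enclosing comma-delimited field via rfind/find of the neighbouring commas, instead of A's split-into-parts, filter-by-tag, index-[0] scans guarded by try/except IndexError.
import Mathlib
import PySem

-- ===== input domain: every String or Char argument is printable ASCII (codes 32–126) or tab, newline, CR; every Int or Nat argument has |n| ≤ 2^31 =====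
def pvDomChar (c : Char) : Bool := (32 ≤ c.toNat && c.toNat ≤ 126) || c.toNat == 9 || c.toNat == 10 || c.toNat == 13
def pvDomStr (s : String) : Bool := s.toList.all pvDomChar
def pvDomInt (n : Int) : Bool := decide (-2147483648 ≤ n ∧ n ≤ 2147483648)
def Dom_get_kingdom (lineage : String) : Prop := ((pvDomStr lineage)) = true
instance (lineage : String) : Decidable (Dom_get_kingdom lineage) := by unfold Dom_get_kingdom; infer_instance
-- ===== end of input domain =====

-- B avoids splitting entirely: it finds the tag's first occurrence in the raw string and cuts out
-- the enclosing comma-delimited field with rfind/find of the neighbouring commas (objective: alternative).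

-- ===== PORT A =====
def get_kingdom (lineage : String) : String :=
  let parts := PySem.Chars.splitOn lineage.toList [',']
  match parts.filter (fun i => PySem.Chars.isIn "(superkingdom)".toList i) with
  | [] => "not_available"
  | s :: _ =>
    let superkingdom_clean :=
      PySem.Chars.replace (PySem.Chars.replace s "(superkingdom)".toList []) [' '] []
    if PySem.Chars.isIn "Bacteria".toList superkingdom_clean
        || PySem.Chars.isIn "Archaea".toList superkingdom_clean then
      String.ofList superkingdom_clean
    else
      match parts.filter (fun i => PySem.Chars.isIn "(kingdom)".toList i) with
      | [] => "not_available"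
      | k :: _ =>
        String.ofList (PySem.Chars.replace (PySem.Chars.replace k "(kingdom)".toList []) [' '] [])

-- ===== PORT B =====
-- Source B's _field: locate tag's first occurrence, cut out the enclosing comma-delimited field
def pvField (s tag : List Char) : Option (List Char) :=
  let i := PySem.Chars.find s tag
  if i = -1 then none
  else
    let start := PySem.Chars.rfindFrom s [','] 0 (some i) + 1
    let e0 := PySem.Chars.findFrom s [','] i none
    let e := if e0 = -1 then (s.length : Int) else e0
    some (PySem.Chars.replace
            (PySem.Chars.replace (PySem.Chars.slice s (some start) (some e)) tag []) [' '] [])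

def get_kingdom_alt (lineage : String) : String :=
  match pvField lineage.toList "(superkingdom)".toList with
  | none => "not_available"
  | some sk =>
    if PySem.Chars.isIn "Bacteria".toList sk || PySem.Chars.isIn "Archaea".toList sk then
      String.ofList sk
    else
      match pvField lineage.toList "(kingdom)".toList with
      | none => "not_available"
      | some kd => String.ofList kd

-- ===== PRECONDITION & SPEC =====
def Spec_get_kingdom (lineage : String) (out : String) : Prop := out = get_kingdom_alt lineage
instance (lineage : String) (out : String) : Decidable (Spec_get_kingdom lineage out) := by unfold Spec_get_kingdom; infer_instance

-- ===== CLAIM (what is proved, stated in full; the proofs are below) =====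
def Claim_equal_get_kingdom : Prop := ∀ (lineage : String), Dom_get_kingdom lineage → Spec_get_kingdom lineage (get_kingdom lineage)

-- ===== LEMMAS AND PROOFS =====
def pvSplit : List Char → List (List Char)
  | [] => [[]]
  | c :: rest => if c = ',' then [] :: pvSplit rest else (pvSplit rest).modifyHead (c :: ·)

theorem pvSplit_ne_nil (s : List Char) : pvSplit s ≠ [] := by
  cases s with
  | nil => simp [pvSplit]
  | cons c rest =>
    simp only [pvSplit]
    split
    · simp
    · have := pvSplit_ne_nil rest
      cases h : pvSplit rest with
      | nil => exact absurd h this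
      | cons a t => simp [List.modifyHead]

theorem pvSplit_go (fuel : ℕ) (l cur : List Char) (acc : List (List Char))
    (h : l.length ≤ fuel) :
    PySem.Chars.splitOn.go [','] fuel l cur acc
      = acc.reverse ++ (pvSplit l).modifyHead (cur.reverse ++ ·) := by
  induction fuel generalizing l cur acc with
  | zero =>
    have : l = [] := List.eq_nil_of_length_eq_zero (Nat.le_zero.mp h)
    subst this
    simp [PySem.Chars.splitOn.go, pvSplit]
  | succ f ih =>
    cases l with
    | nil => simp [PySem.Chars.splitOn.go, pvSplit]
    | cons c rest =>
      by_cases hc : c = ','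
      · subst hc
        rw [PySem.Chars.splitOn.go]
        simp only [List.isPrefixOf, Bool.and_true, beq_self_eq_true, if_pos, List.length_cons,
          List.length_nil, List.drop_succ_cons, List.drop_zero]
        rw [ih rest [] _ (by simpa using Nat.le_of_succ_le_succ h)]
        simp only [pvSplit, List.modifyHead, List.reverse_nil, List.reverse_cons,
          List.append_assoc, List.singleton_append, List.nil_append]
        cases pvSplit rest <;> simp
      · rw [PySem.Chars.splitOn.go]
        have hpre : [','].isPrefixOf (c :: rest) = false := by
          simp [List.isPrefixOf]; exact fun hh => absurd hh.symm hc
        simp only [hpre, if_neg, Bool.false_eq_true, not_false_iff]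
        rw [ih rest (c :: cur) acc (by simpa using Nat.le_of_succ_le_succ h)]
        have hne := pvSplit_ne_nil rest
        cases hr : pvSplit rest with
        | nil => exact absurd hr hne
        | cons a t => simp [pvSplit, hc, hr, List.modifyHead]

theorem splitOn_eq_pvSplit (s : List Char) :
    PySem.Chars.splitOn s [','] = pvSplit s := by
  unfold PySem.Chars.splitOn
  rw [pvSplit_go _ _ _ _ (by omega)]
  have := pvSplit_ne_nil s
  cases h : pvSplit s with
  | nil => exact absurd h this
  | cons a t => simp [List.modifyHead]

theorem pvSplit_no_comma (s : List Char) (h : ',' ∉ s) : pvSplit s = [s] := by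
  induction s with
  | nil => rfl
  | cons c rest ih =>
    simp only [List.mem_cons, not_or] at h
    have hc : ¬ c = ',' := fun hc => absurd hc.symm h.1
    simp [pvSplit, hc, ih h.2, List.modifyHead]

theorem pvSplit_append (a b : List Char) (h : ',' ∉ a) :
    pvSplit (a ++ ',' :: b) = a :: pvSplit b := by
  induction a with
  | nil => simp [pvSplit]
  | cons c rest ih =>
    simp only [List.mem_cons, not_or] at h
    have hne := pvSplit_ne_nil (rest ++ ',' :: b)
    have hc : ¬ c = ',' := fun hc => absurd hc.symm h.1
    simp [List.cons_append, pvSplit, hc, ih h.2, List.modifyHead]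


theorem prefix_single_iff (c : Char) (s : List Char) (j : ℕ) :
    [c] <+: s.drop j ↔ s[j]? = some c := by
  rw [← List.head?_drop]
  constructor
  · rintro ⟨t, ht⟩; rw [← ht]; rfl
  · intro h
    cases hd : s.drop j with
    | nil => simp [hd] at h
    | cons x t => simp [hd] at h; exact ⟨t, by simp [h]⟩

theorem find_eq_of (s sub : List Char) (j : ℕ) (h1 : sub <+: s.drop j)
    (h2 : ∀ k < j, ¬ sub <+: s.drop k) : PySem.Chars.find s sub = j := by
  have hinfix : sub <:+: s := (h1.isInfix).trans (s.drop_suffix j).isInfix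
  have hnn : 0 ≤ PySem.Chars.find s sub := (PySem.Chars.find_nonneg_iff s sub).mpr hinfix
  obtain ⟨hp, hmin⟩ := PySem.Chars.find_spec hnn
  have hij : (PySem.Chars.find s sub).toNat = j := by
    rcases lt_trichotomy (PySem.Chars.find s sub).toNat j with h | h | h
    · exact absurd hp (h2 _ h)
    · exact h
    · exact absurd h1 (hmin j h)
  omega

theorem rfind_go_eq_of (s sub : List Char) (n j : ℕ) (hj : j ≤ n)
    (h1 : sub <+: s.drop j) (h2 : ∀ k, j < k → ¬ sub <+: s.drop k) :
    PySem.Chars.rfind.go s sub n = j := by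
  induction n with
  | zero =>
    have : j = 0 := Nat.le_zero.mp hj
    subst this
    rw [PySem.Chars.rfind.go]
    simp only [List.drop_zero] at h1
    simp [List.isPrefixOf_iff_prefix, h1]
  | succ m ih =>
    rw [PySem.Chars.rfind.go]
    by_cases he : j = m + 1
    · subst he
      simp [List.isPrefixOf_iff_prefix, h1]
    · have hjm : j ≤ m := by omega
      have hnp := h2 (m+1) (by omega)
      simp only [List.isPrefixOf_iff_prefix]
      rw [if_neg (by simpa using hnp)]
      exact ih hjm

theorem rfind_eq_of (s : List Char) (c : Char) (j : ℕ)
    (h1 : s[j]? = some c) (h2 : ∀ k, j < k → s[k]? ≠ some c) :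
    PySem.Chars.rfind s [c] = j := by
  unfold PySem.Chars.rfind
  refine rfind_go_eq_of s [c] s.length j ?_ ((prefix_single_iff c s j).mpr h1)
    (fun k hk hp => h2 k hk ((prefix_single_iff c s k).mp hp))
  have : j < s.length := by
    by_contra hge
    rw [List.getElem?_eq_none (by omega)] at h1
    simp at h1
  omega

theorem rfind_go_le (s sub : List Char) (n : ℕ) (h : ∀ j ≤ n, ¬ sub <+: s.drop j) :
    PySem.Chars.rfind.go s sub n = -1 := by
  induction n with
  | zero =>
    rw [PySem.Chars.rfind.go]
    have := h 0 (le_refl 0)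
    simp only [List.drop_zero] at this
    simp [List.isPrefixOf_iff_prefix, this]
  | succ m ih =>
    rw [PySem.Chars.rfind.go]
    have hm := h (m+1) (le_refl _)
    simp only [List.isPrefixOf_iff_prefix]
    rw [if_neg (by simpa using hm)]
    exact ih (fun j hj => h j (Nat.le_succ_of_le hj))

theorem rfind_single_not_mem (c : Char) (s : List Char) (h : c ∉ s) :
    PySem.Chars.rfind s [c] = -1 := by
  unfold PySem.Chars.rfind
  refine rfind_go_le s [c] s.length (fun j _ hp => ?_)
  exact h (List.mem_of_mem_drop (hp.subset (by simp)))

-- last occurrence exists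
theorem exists_last_idx (c : Char) (s : List Char) (h : c ∈ s) :
    ∃ m : ℕ, s[m]? = some c ∧ ∀ k, m < k → s[k]? ≠ some c := by
  induction s using List.reverseRecOn with
  | nil => simp at h
  | append_singleton s x ih =>
    by_cases hx : x = c
    · subst hx
      refine ⟨s.length, by simp, fun k hk => ?_⟩
      rw [List.getElem?_eq_none (by simp; omega)]
      simp
    · have hc : c ∈ s := by
        rcases List.mem_append.mp h with h' | h'
        · exact h'
        · simp at h'; exact absurd h'.symm hx
      obtain ⟨m, hm1, hm2⟩ := ih hc
      have hmlt : m < s.length := by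
        by_contra hge
        rw [List.getElem?_eq_none (by omega)] at hm1
        simp at hm1
      refine ⟨m, by rw [List.getElem?_append_left hmlt]; exact hm1, fun k hk => ?_⟩
      by_cases hks : k < s.length
      · rw [List.getElem?_append_left hks]; exact hm2 k hk
      · by_cases hke : k = s.length
        · subst hke
          simp
          exact fun h' => absurd h' hx
        · rw [List.getElem?_eq_none (by simp; omega)]
          simp

-- shifting rfind over "a ++ ',' :: y"
theorem rfind_comma_append (a y : List Char) :
    PySem.Chars.rfind (a ++ ',' :: y) [','] = (a.length : ℤ) + 1 + PySem.Chars.rfind y [','] := by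
  by_cases hy : ',' ∈ y
  · obtain ⟨m, hm1, hm2⟩ := exists_last_idx ',' y hy
    have hb : PySem.Chars.rfind y [','] = m := rfind_eq_of y ',' m hm1 hm2
    have hs : PySem.Chars.rfind (a ++ ',' :: y) [','] = (a.length + 1 + m : ℕ) := by
      apply rfind_eq_of
      · have hidx : (a ++ ',' :: y)[a.length + 1 + m]? = y[m]? := by
          rw [List.getElem?_append_right (by omega),
            show a.length + 1 + m - a.length = m + 1 by omega, List.getElem?_cons_succ]
        rw [hidx]; exact hm1
      · intro k hk
        have hk2 : a.length < k := by omega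
        rw [List.getElem?_append_right (by omega)]
        have : k - a.length = (k - a.length - 1) + 1 := by omega
        rw [this]
        simpa using hm2 (k - a.length - 1) (by omega)
    rw [hs, hb]; push_cast; ring
  · have hb : PySem.Chars.rfind y [','] = -1 := rfind_single_not_mem ',' y hy
    have hs : PySem.Chars.rfind (a ++ ',' :: y) [','] = (a.length : ℕ) := by
      apply rfind_eq_of
      · rw [List.getElem?_append_right (le_refl _)]; simp
      · intro k hk
        rw [List.getElem?_append_right (by omega)]
        have : k - a.length = (k - a.length - 1) + 1 := by omega
        rw [this]
        intro hcon
        simp only [List.getElem?_cons_succ] at hcon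
        exact hy (List.mem_of_getElem? hcon)
    rw [hs, hb]; ring

-- find of ',' in "x ++ ',' :: b" when x is comma-free
theorem find_comma_at (x b : List Char) (hx : ',' ∉ x) :
    PySem.Chars.find (x ++ ',' :: b) [','] = (x.length : ℤ) := by
  apply find_eq_of
  · rw [prefix_single_iff, List.getElem?_append_right (le_refl _)]; simp
  · intro k hk
    rw [prefix_single_iff, List.getElem?_append_left hk]
    intro hcon
    exact hx (List.mem_of_getElem? hcon)

-- an occurrence of a comma-free nonempty tag at position k ≤ |a| inside "a ++ ',' :: b" lies inside a
theorem occ_left (tag a b : List Char) (ht2 : ',' ∉ tag) (k : ℕ) (hk : k ≤ a.length)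
    (hp : tag <+: (a ++ ',' :: b).drop k) : tag <+: a.drop k := by
  rw [List.drop_append, show k - a.length = 0 by omega, List.drop_zero] at hp
  by_cases hlen : tag.length ≤ (a.drop k).length
  · exact (List.isPrefix_append_of_length hlen).mp hp
  · exfalso
    obtain ⟨t, ht⟩ := hp
    have : ',' ∈ tag := by
      have h1 : (tag ++ t)[(a.drop k).length]? = some ',' := by
        rw [ht, List.getElem?_append_right (le_refl _)]; simp
      rw [List.getElem?_append_left (by omega)] at h1
      exact List.mem_of_getElem? h1
    exact ht2 this

theorem find_single_not_mem (c : Char) (s : List Char) (h : c ∉ s) :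
    PySem.Chars.find s [c] = -1 := by
  rw [PySem.Chars.find_eq_neg_one_iff]
  intro hin
  exact h (hin.subset (by simp))

theorem rfindFrom_zero (s sub : List Char) (e : ℤ) (h0 : 0 ≤ e) (h1 : e ≤ s.length) :
    PySem.Chars.rfindFrom s sub 0 (some e) = PySem.Chars.rfind (s.take e.toNat) sub := by
  unfold PySem.Chars.rfindFrom
  have hne : ¬ (s.length : ℤ) < e := not_lt.mpr h1
  have hnn : ¬ e < (0:ℤ) := not_lt.mpr h0
  simp only [hne, hnn, lt_irrefl, Int.toNat_zero, List.drop_zero, if_false, zero_add]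
  split <;> rename_i hr
  · rw [hr]
  · rfl

def pvRaw (s tag : List Char) : Option (List Char) :=
  let i := PySem.Chars.find s tag
  if i = -1 then none
  else
    let start := PySem.Chars.rfindFrom s [','] 0 (some i) + 1
    let e0 := PySem.Chars.findFrom s [','] i none
    let e := if e0 = -1 then (s.length : Int) else e0
    some (PySem.Chars.slice s (some start) (some e))

theorem pvField_eq_map (s tag : List Char) :
    pvField s tag = (pvRaw s tag).map
      (fun p => PySem.Chars.replace (PySem.Chars.replace p tag []) [' '] []) := by
  by_cases h : PySem.Chars.find s tag = -1 <;> simp [pvField, pvRaw, h]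

theorem pvRaw_none (s tag : List Char) (h : PySem.Chars.find s tag = -1) :
    pvRaw s tag = none := by
  unfold pvRaw
  rw [if_pos h]

theorem pvRaw_eval (s tag : List Char) (h : ¬ PySem.Chars.find s tag = -1) :
    pvRaw s tag = some (PySem.Chars.slice s
      (some (PySem.Chars.rfindFrom s [','] 0 (some (PySem.Chars.find s tag)) + 1))
      (some (if PySem.Chars.findFrom s [','] (PySem.Chars.find s tag) none = -1
             then (s.length : ℤ) else PySem.Chars.findFrom s [','] (PySem.Chars.find s tag) none))) := by
  unfold pvRaw
  rw [if_neg h]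

theorem neg_one_le_rfind (s : List Char) (c : Char) : -1 ≤ PySem.Chars.rfind s [c] := by
  by_cases h : c ∈ s
  · obtain ⟨m, h1, h2⟩ := exists_last_idx c s h
    rw [rfind_eq_of s c m h1 h2]; omega
  · rw [rfind_single_not_mem c s h]

theorem slice_shift (a b : List Char) (c : Char) (u v : ℤ) (hu : 0 ≤ u) (hv : 0 ≤ v) :
    PySem.List.slice (a ++ c :: b) (some ((a.length : ℤ) + 1 + u)) (some ((a.length : ℤ) + 1 + v))
      = PySem.List.slice b (some u) (some v) := by
  rw [PySem.List.slice_toNat _ (by omega) (by omega), PySem.List.slice_toNat _ hu hv]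
  have h1 : ((a.length : ℤ) + 1 + u).toNat = a.length + (1 + u.toNat) := by omega
  have h2 : ((a.length : ℤ) + 1 + v).toNat - ((a.length : ℤ) + 1 + u).toNat = v.toNat - u.toNat := by omega
  rw [h1]
  rw [show (↑a.length + 1 + v).toNat - (a.length + (1 + u.toNat)) = v.toNat - u.toNat by omega]
  rw [List.drop_append, List.drop_eq_nil_of_le (by omega)]
  simp only [show a.length + (1 + u.toNat) - a.length = u.toNat + 1 by omega,
    List.drop_succ_cons, List.nil_append]


theorem first_comma (s : List Char) (hc : ',' ∈ s) :
    ∃ a b, s = a ++ ',' :: b ∧ ',' ∉ a := by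
  induction s with
  | nil => simp at hc
  | cons x t ih =>
    by_cases hx : x = ','
    · exact ⟨[], t, by rw [hx]; rfl, by simp⟩
    · have hct : ',' ∈ t := by
        rcases List.mem_cons.mp hc with h | h
        · exact absurd h.symm hx
        · exact h
      obtain ⟨a, b, hab, hna⟩ := ih hct
      refine ⟨x :: a, b, by rw [hab]; rfl, ?_⟩
      simp only [List.mem_cons, not_or]
      exact ⟨fun h => hx h.symm, hna⟩

theorem pvRaw_left (tag a b : List Char) (ht1 : tag ≠ []) (ht2 : ',' ∉ tag)
    (ha : ',' ∉ a) (hA : PySem.Chars.isIn tag a = true) :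
    pvRaw (a ++ ',' :: b) tag = some a := by
  have hinfa : tag <:+: a := (PySem.Chars.isIn_iff_infix tag a).mp hA
  have hnnA : 0 ≤ PySem.Chars.find a tag := (PySem.Chars.find_nonneg_iff a tag).mpr hinfa
  obtain ⟨hpA, hminA⟩ := PySem.Chars.find_spec hnnA
  set j := (PySem.Chars.find a tag).toNat with hj
  have hjle : j ≤ a.length := by
    by_contra h'
    rw [List.drop_eq_nil_of_le (by omega)] at hpA
    exact ht1 (List.prefix_nil.mp hpA)
  have hjtag : j + tag.length ≤ a.length := by
    have h1 := hpA.length_le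
    rw [List.length_drop] at h1
    omega
  have hjlt : j < a.length := by
    have : tag.length ≠ 0 := fun h => ht1 (List.eq_nil_of_length_eq_zero h)
    omega
  have hfs : PySem.Chars.find (a ++ ',' :: b) tag = ((j : ℕ) : ℤ) := by
    apply find_eq_of
    · rw [List.drop_append, show j - a.length = 0 by omega, List.drop_zero]
      exact hpA.trans (List.prefix_append _ _)
    · exact fun k hk hp => hminA k hk (occ_left tag a b ht2 k (by omega) hp)
  rw [pvRaw_eval _ tag (by rw [hfs]; omega), hfs]
  have h1 : PySem.Chars.rfindFrom (a ++ ',' :: b) [','] 0 (some ((j : ℕ) : ℤ)) = -1 := by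
    rw [rfindFrom_zero _ _ _ (by omega) (by simp; omega)]
    rw [show ((j : ℕ) : ℤ).toNat = j by omega]
    rw [List.take_append_of_le_length (by omega)]
    exact rfind_single_not_mem ',' _ (fun hm => ha (List.mem_of_mem_take hm))
  have h2 : PySem.Chars.findFrom (a ++ ',' :: b) [','] ((j : ℕ) : ℤ) none = (a.length : ℤ) := by
    rw [PySem.Chars.findFrom_natCast _ _ j (by simp; omega)]
    rw [List.drop_append, show j - a.length = 0 by omega, List.drop_zero]
    rw [find_comma_at _ b (fun hm => ha (List.mem_of_mem_drop hm))]
    rw [if_neg (by omega)]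
    rw [List.length_drop]
    omega
  rw [h1, h2, if_neg (by omega)]
  rw [show (-1 : ℤ) + 1 = 0 by ring]
  rw [PySem.Chars.slice_eq_listSlice, PySem.List.slice_toNat _ (by omega) (by omega)]
  rw [Int.toNat_zero, List.drop_zero, Nat.sub_zero]
  rw [show ((a.length : ℤ)).toNat = a.length by omega]
  rw [List.take_append_of_le_length (le_refl _), List.take_length]

theorem shift_prefix (tag a b : List Char) (k : ℕ) (hk : a.length < k)
    (hp : tag <+: (a ++ ',' :: b).drop k) : tag <+: b.drop (k - a.length - 1) := by
  rw [List.drop_append, List.drop_eq_nil_of_le (by omega), List.nil_append,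
    show k - a.length = (k - a.length - 1) + 1 by omega, List.drop_succ_cons] at hp
  exact hp

theorem pvRaw_right (tag a b : List Char) (ht1 : tag ≠ []) (ht2 : ',' ∉ tag)
    (_ha : ',' ∉ a) (hA : ¬ PySem.Chars.isIn tag a = true) :
    pvRaw (a ++ ',' :: b) tag = pvRaw b tag := by
  have hninfa : ¬ tag <:+: a := fun h => hA ((PySem.Chars.isIn_iff_infix tag a).mpr h)
  by_cases hB : PySem.Chars.isIn tag b = true
  · have hinfb : tag <:+: b := (PySem.Chars.isIn_iff_infix tag b).mp hB
    have hnnB : 0 ≤ PySem.Chars.find b tag := (PySem.Chars.find_nonneg_iff b tag).mpr hinfb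
    obtain ⟨hpB, hminB⟩ := PySem.Chars.find_spec hnnB
    set m := (PySem.Chars.find b tag).toNat with hm
    have hmle : m ≤ b.length := by
      by_contra h'
      rw [List.drop_eq_nil_of_le (by omega)] at hpB
      exact ht1 (List.prefix_nil.mp hpB)
    have hmtag : m + tag.length ≤ b.length := by
      have h1 := hpB.length_le
      rw [List.length_drop] at h1
      omega
    have hmlt : m < b.length := by
      have : tag.length ≠ 0 := fun h => ht1 (List.eq_nil_of_length_eq_zero h)
      omega
    have hfs : PySem.Chars.find (a ++ ',' :: b) tag = ((a.length + 1 + m : ℕ) : ℤ) := by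
      apply find_eq_of
      · rw [List.drop_append, List.drop_eq_nil_of_le (by omega), List.nil_append,
          show a.length + 1 + m - a.length = m + 1 by omega, List.drop_succ_cons]
        exact hpB
      · intro k hk hp
        by_cases hka : k ≤ a.length
        · exact hninfa ((occ_left tag a b ht2 k hka hp).isInfix.trans (a.drop_suffix k).isInfix)
        · exact hminB (k - a.length - 1) (by omega) (shift_prefix tag a b k (by omega) hp)
    rw [pvRaw_eval _ tag (by rw [hfs]; omega), pvRaw_eval b tag (by omega), hfs,
      show PySem.Chars.find b tag = ((m : ℕ) : ℤ) by omega]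
    have hstart : PySem.Chars.rfindFrom (a ++ ',' :: b) [','] 0 (some ((a.length + 1 + m : ℕ) : ℤ))
        = (a.length : ℤ) + 1 + PySem.Chars.rfindFrom b [','] 0 (some ((m : ℕ) : ℤ)) := by
      rw [rfindFrom_zero _ _ _ (by omega) (by simp; omega),
        rfindFrom_zero _ _ _ (by omega) (by exact_mod_cast Nat.cast_le.mpr hmle)]
      rw [show ((a.length + 1 + m : ℕ) : ℤ).toNat = a.length + (1 + m) by omega,
        show ((m : ℕ) : ℤ).toNat = m by omega]
      rw [List.take_append, List.take_of_length_le (by omega),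
        show a.length + (1 + m) - a.length = m + 1 by omega, List.take_succ_cons]
      exact rfind_comma_append a (b.take m)
    have hdrop : (a ++ ',' :: b).drop (a.length + 1 + m) = b.drop m := by
      rw [List.drop_append, List.drop_eq_nil_of_le (by omega), List.nil_append,
        show a.length + 1 + m - a.length = m + 1 by omega, List.drop_succ_cons]
    have hf1 : PySem.Chars.findFrom (a ++ ',' :: b) [','] ((a.length + 1 + m : ℕ) : ℤ) none
        = if PySem.Chars.find (b.drop m) [','] = -1 then -1
          else ((a.length + 1 + m : ℕ) : ℤ) + PySem.Chars.find (b.drop m) [','] := by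
      rw [PySem.Chars.findFrom_natCast _ _ _ (by simp; omega), hdrop]
    have hf2 : PySem.Chars.findFrom b [','] ((m : ℕ) : ℤ) none
        = if PySem.Chars.find (b.drop m) [','] = -1 then -1
          else ((m : ℕ) : ℤ) + PySem.Chars.find (b.drop m) [','] := by
      rw [PySem.Chars.findFrom_natCast _ _ _ hmle]
    have hu0 : 0 ≤ PySem.Chars.rfindFrom b [','] 0 (some ((m : ℕ) : ℤ)) + 1 := by
      rw [rfindFrom_zero _ _ _ (by omega) (by exact_mod_cast Nat.cast_le.mpr hmle)]
      have := neg_one_le_rfind (b.take ((m : ℤ)).toNat) ','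
      omega
    rw [hstart, hf1, hf2]
    by_cases hfd : PySem.Chars.find (b.drop m) [','] = -1
    · rw [if_pos hfd, if_pos hfd, if_pos rfl, if_pos rfl]
      rw [PySem.Chars.slice_eq_listSlice, PySem.Chars.slice_eq_listSlice]
      rw [show ((a ++ ',' :: b).length : ℤ) = (a.length : ℤ) + 1 + (b.length : ℤ) by
        simp; ring]
      rw [show (a.length : ℤ) + 1 + PySem.Chars.rfindFrom b [','] 0 (some ((m : ℕ) : ℤ)) + 1
          = (a.length : ℤ) + 1 + (PySem.Chars.rfindFrom b [','] 0 (some ((m : ℕ) : ℤ)) + 1) by ring]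
      exact congrArg some (slice_shift a b ',' _ ((b.length : ℕ) : ℤ) hu0 (by omega))
    · have hfd0 : 0 ≤ PySem.Chars.find (b.drop m) [','] := by
        have := PySem.Chars.neg_one_le_find (b.drop m) [',']
        omega
      rw [if_neg hfd, if_neg hfd, if_neg (by omega), if_neg (by omega)]
      rw [PySem.Chars.slice_eq_listSlice, PySem.Chars.slice_eq_listSlice]
      rw [show ((a.length + 1 + m : ℕ) : ℤ) + PySem.Chars.find (b.drop m) [','] =
          (a.length : ℤ) + 1 + (((m : ℕ) : ℤ) + PySem.Chars.find (b.drop m) [',']) by push_cast; ring]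
      rw [show (a.length : ℤ) + 1 + PySem.Chars.rfindFrom b [','] 0 (some ((m : ℕ) : ℤ)) + 1
          = (a.length : ℤ) + 1 + (PySem.Chars.rfindFrom b [','] 0 (some ((m : ℕ) : ℤ)) + 1) by ring]
      exact congrArg some (slice_shift a b ','
        _ (((m : ℕ) : ℤ) + PySem.Chars.find (b.drop m) [',']) hu0 (by omega))
  · have hninfb : ¬ tag <:+: b := fun h => hB ((PySem.Chars.isIn_iff_infix tag b).mpr h)
    have hfb : PySem.Chars.find b tag = -1 := (PySem.Chars.find_eq_neg_one_iff b tag).mpr hninfb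
    have hfs : PySem.Chars.find (a ++ ',' :: b) tag = -1 := by
      rw [PySem.Chars.find_eq_neg_one_iff]
      intro hinf
      obtain ⟨j, hp⟩ := (PySem.Chars.exists_prefix_drop_iff_isIn tag (a ++ ',' :: b)).mpr
        ((PySem.Chars.isIn_iff_infix tag (a ++ ',' :: b)).mpr hinf)
      by_cases hj : j ≤ a.length
      · exact hninfa ((occ_left tag a b ht2 j hj hp).isInfix.trans (a.drop_suffix j).isInfix)
      · exact hninfb ((shift_prefix tag a b j (by omega) hp).isInfix.trans
          (b.drop_suffix _).isInfix)
    rw [pvRaw_none _ _ hfs, pvRaw_none _ _ hfb]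

theorem main_lemma (tag : List Char) (ht1 : tag ≠ []) (ht2 : ',' ∉ tag) (s : List Char) :
    ((pvSplit s).filter (fun p => PySem.Chars.isIn tag p)).head? = pvRaw s tag := by
  induction hn : s.length using Nat.strong_induction_on generalizing s with
  | _ n ih =>
  subst hn
  by_cases hc : ',' ∈ s
  · obtain ⟨a, b, rfl, ha⟩ := first_comma s hc
    rw [pvSplit_append a b ha]
    by_cases hA : PySem.Chars.isIn tag a = true
    · rw [pvRaw_left tag a b ht1 ht2 ha hA]
      simp [List.filter, hA]
    · have hAf : PySem.Chars.isIn tag a = false := by simpa using hA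
      rw [pvRaw_right tag a b ht1 ht2 ha hA]
      have hstep : (List.filter (fun p => PySem.Chars.isIn tag p) (a :: pvSplit b))
          = List.filter (fun p => PySem.Chars.isIn tag p) (pvSplit b) := by
        simp [List.filter, hAf]
      rw [hstep]
      exact ih b.length (by simp; omega) b rfl
  · rw [pvSplit_no_comma s hc]
    cases hIn : PySem.Chars.isIn tag s with
    | false =>
      have hfind : PySem.Chars.find s tag = -1 := by
        have := hIn
        unfold PySem.Chars.isIn at this
        simpa using this
      rw [pvRaw_none s tag hfind]
      simp [List.filter, hIn]
    | true =>
      have hinf : tag <:+: s := (PySem.Chars.isIn_iff_infix tag s).mp hIn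
      have hnn : 0 ≤ PySem.Chars.find s tag := (PySem.Chars.find_nonneg_iff s tag).mpr hinf
      have hle : PySem.Chars.find s tag ≤ s.length := PySem.Chars.find_le_length s tag
      have hne : ¬ PySem.Chars.find s tag = -1 := by omega
      rw [pvRaw_eval s tag hne]
      have hrf : PySem.Chars.rfindFrom s [','] 0 (some (PySem.Chars.find s tag)) = -1 := by
        rw [rfindFrom_zero s [','] _ hnn hle]
        exact rfind_single_not_mem ',' _ (fun hm => hc (List.mem_of_mem_take hm))
      have hff : PySem.Chars.findFrom s [','] (PySem.Chars.find s tag) none = -1 := by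
        rw [show PySem.Chars.find s tag = (((PySem.Chars.find s tag).toNat : ℕ) : ℤ) by omega]
        rw [PySem.Chars.findFrom_natCast s [','] _ (by omega)]
        rw [find_single_not_mem ',' _ (fun hm => hc (List.mem_of_mem_drop hm))]
        simp
      rw [hrf, hff]
      simp only [if_pos]
      have hsl : PySem.Chars.slice s (some (-1 + 1)) (some ((s.length : ℕ) : ℤ)) = s := by
        rw [show (-1 : ℤ) + 1 = 0 by ring, PySem.Chars.slice_eq_listSlice,
          PySem.List.slice_toNat _ (by omega) (by omega)]
        simp
      rw [hsl]
      simp [List.filter, hIn]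

-- ===== VERDICT (by name: the statement is the Claim_ definition above) =====

theorem get_kingdom_spec : Claim_equal_get_kingdom := by
  intro lineage _
  unfold Spec_get_kingdom get_kingdom get_kingdom_alt
  rw [splitOn_eq_pvSplit]
  have hsk := main_lemma "(superkingdom)".toList (by decide) (by decide) lineage.toList
  have hkd := main_lemma "(kingdom)".toList (by decide) (by decide) lineage.toList
  rw [pvField_eq_map, pvField_eq_map, ← hsk, ← hkd]
  cases h1 : ((pvSplit lineage.toList).filter
      (fun p => PySem.Chars.isIn "(superkingdom)".toList p)) with
  | nil => simp only [h1, List.head?, Option.map_none]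
  | cons p ps =>
    simp only [h1, List.head?, Option.map_some]
    split_ifs with h
    · rfl
    · cases h2 : ((pvSplit lineage.toList).filter
        (fun p => PySem.Chars.isIn "(kingdom)".toList p)) with
      | nil => simp only [Option.map_none]
      | cons k ks => simp only [Option.map_some]
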